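-- pv_equiv track=rewrite | github.com/sergiosinlimites/21-days-python-challenge | largest_palindrome.py | find_largest_palindrome
-- ===== SOURCE A (Python) =====
-- def find_largest_palindrome(words):
--   largest = 0
--   palindrome = ""
--
--   for word in words:
--     if word == word[::-1]:
--       if len(word) > largest:
--           palindrome = word
--           largest = len(word)
--
--   return palindrome if palindrome else None
-- ===== SOURCE B (Python) =====
-- def find_largest_palindrome(words):
--   # Sort by length, longest first (stable), then return the first palindrome.
--   for w in sorted(words, key=len, reverse=True):
--     if w and w == w[::-1]:
--       return w
--   return None
-- ===== Notes on version B (the rewrite author's own statement) =====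
-- stated objective: alternative
-- what changed: Replaces A's single-pass best-so-far accumulator with sort-then-scan: stable-sort the words by length in descending order and return the first palindrome found; stability plus A's strict '>' update make the tie-breaking identical.
import Mathlib
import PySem

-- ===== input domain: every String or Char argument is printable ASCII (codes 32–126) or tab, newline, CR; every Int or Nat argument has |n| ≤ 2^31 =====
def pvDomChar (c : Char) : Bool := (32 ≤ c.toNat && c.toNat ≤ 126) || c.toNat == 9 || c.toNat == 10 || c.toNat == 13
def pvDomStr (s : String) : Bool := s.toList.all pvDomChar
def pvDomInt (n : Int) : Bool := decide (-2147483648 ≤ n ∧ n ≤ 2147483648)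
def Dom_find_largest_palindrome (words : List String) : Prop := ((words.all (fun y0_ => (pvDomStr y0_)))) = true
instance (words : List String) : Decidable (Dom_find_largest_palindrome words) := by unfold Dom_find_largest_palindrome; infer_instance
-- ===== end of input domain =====

-- B replaces A's single-pass best-so-far accumulator by sort-then-scan: stable length-descending
-- sort, then return the first palindrome; stability + A's strict '>' give the same tie-breaking.

-- ===== PORT A =====
def find_largest_palindrome (words : List String) : Option String :=
  let st := words.foldl (fun (acc : Int × String) word =>
    if PySem.Str.slice? word none none (-1) = some word then
      if PySem.Str.len word > acc.1 then (PySem.Str.len word, word) else acc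
    else acc) (0, "")
  if st.2 = "" then none else some st.2

-- ===== PORT B =====
-- 'w and w == w[::-1]'
def pvIsPal (w : String) : Bool := !(w == "") && (PySem.Str.slice? w none none (-1) == some w)

def find_largest_palindrome_alt (words : List String) : Option String :=
  (PySem.List.sorted words PySem.Str.len true).find? pvIsPal

-- ===== PRECONDITION & SPEC =====
def Spec_find_largest_palindrome (words : List String) (out : Option String) : Prop := out = find_largest_palindrome_alt words
instance (words : List String) (out : Option String) : Decidable (Spec_find_largest_palindrome words out) := by unfold Spec_find_largest_palindrome; infer_instance

-- ===== CLAIM (what is proved, stated in full; the proofs are below) =====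
def Claim_equal_find_largest_palindrome : Prop := ∀ (words : List String), Dom_find_largest_palindrome words → Spec_find_largest_palindrome words (find_largest_palindrome words)


-- ===== LEMMAS AND PROOFS =====

-- inserting a non-palindrome never changes the first palindrome found
lemma pv_find_insert_neg {α : Type} (b : α → α → Bool) (p : α → Bool) (x : α) (s : List α)
    (hx : p x = false) :
    (PySem.List.insertBy b x s).find? p = s.find? p := by
  induction s with
  | nil => simp [PySem.List.insertBy, List.find?, hx]
  | cons y ys ih =>
    by_cases hb : b x y = true
    · simp [PySem.List.insertBy, hb, List.find?, hx]
    · cases hy : p y <;> simp [PySem.List.insertBy, hb, List.find?, hy, ih]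

-- inserting a palindrome x into a length-descending list: x becomes the first palindrome
-- exactly when it is strictly longer than the previous first palindrome (or there was none)
lemma pv_find_insert_pos (x : String) (s : List String)
    (hs : s.Pairwise (fun a b => PySem.Str.len b ≤ PySem.Str.len a)) (hx : pvIsPal x = true) :
    (PySem.List.insertBy (fun a b => decide (PySem.Str.len b < PySem.Str.len a)) x s).find? pvIsPal =
      match s.find? pvIsPal with
      | none => some x
      | some q => if PySem.Str.len q < PySem.Str.len x then some x else some q := by
  induction s with
  | nil => simp [PySem.List.insertBy, List.find?, hx]
  | cons y ys ih =>
    have hy' : ∀ b ∈ ys, PySem.Str.len b ≤ PySem.Str.len y := (List.pairwise_cons.mp hs).1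
    have hys : ys.Pairwise (fun a b => PySem.Str.len b ≤ PySem.Str.len a) :=
      (List.pairwise_cons.mp hs).2
    by_cases hb : PySem.Str.len y < PySem.Str.len x
    · -- x is inserted in front of y
      simp only [PySem.List.insertBy, decide_eq_true_eq, if_pos hb]
      rw [List.find?_cons_of_pos hx]
      cases hpy : pvIsPal y with
      | true =>
        rw [List.find?_cons_of_pos hpy]
        show some x = if PySem.Str.len y < PySem.Str.len x then some x else some y
        rw [if_pos hb]
      | false =>
        rw [List.find?_cons_of_neg (by simp [hpy])]
        cases hfy : ys.find? pvIsPal with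
        | none => rfl
        | some q =>
          have hq : q ∈ ys := List.mem_of_find?_eq_some hfy
          have hlt : PySem.Str.len q < PySem.Str.len x := lt_of_le_of_lt (hy' q hq) hb
          show some x = if PySem.Str.len q < PySem.Str.len x then some x else some q
          rw [if_pos hlt]
    · -- x goes after y
      simp only [PySem.List.insertBy, decide_eq_true_eq, if_neg hb]
      cases hpy : pvIsPal y with
      | true =>
        rw [List.find?_cons_of_pos hpy, List.find?_cons_of_pos hpy]
        show some y = if PySem.Str.len y < PySem.Str.len x then some x else some y
        rw [if_neg hb]
      | false =>
        rw [List.find?_cons_of_neg (by simp [hpy]), List.find?_cons_of_neg (by simp [hpy])]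
        exact ih hys

-- the loop invariant: A's accumulator is (len p, p) for p the first palindrome of the
-- length-descending stable sort (and (0, "") when there is none)
lemma pv_inv (words : List String) :
    words.foldl (fun (acc : Int × String) word =>
        if PySem.Str.slice? word none none (-1) = some word then
          if PySem.Str.len word > acc.1 then (PySem.Str.len word, word) else acc
        else acc) (0, "")
      = match (PySem.List.sorted words PySem.Str.len true).find? pvIsPal with
        | none => ((0 : Int), "")
        | some p => (PySem.Str.len p, p) := by
  induction words using List.reverseRecOn with
  | nil => simp [PySem.List.sorted]
  | append_singleton xs x ih =>
    have hsorted : PySem.List.sorted (xs ++ [x]) PySem.Str.len true =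
        PySem.List.insertBy (fun a b => decide (PySem.Str.len b < PySem.Str.len a)) x
          (PySem.List.sorted xs PySem.Str.len true) := by
      simp [PySem.List.sorted, List.foldl_append]
    have hpair : (PySem.List.sorted xs PySem.Str.len true).Pairwise
        (fun a b => PySem.Str.len b ≤ PySem.Str.len a) :=
      PySem.List.sorted_pairwise_rev xs PySem.Str.len
    rw [List.foldl_append, ih, hsorted]
    by_cases hpal : PySem.Str.slice? x none none (-1) = some x
    · by_cases hne : x = ""
      · -- empty string: palindrome test passes but neither side changes
        subst hne
        rw [pv_find_insert_neg _ _ _ _ (show pvIsPal "" = false by simp [pvIsPal])]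
        cases hrx : (PySem.List.sorted xs PySem.Str.len true).find? pvIsPal with
        | none => simp [hpal, PySem.Str.len]
        | some q =>
          have hqle : (0 : Int) ≤ PySem.Str.len q := by
            simp [PySem.Str.len]
          simp only [List.foldl_cons, List.foldl_nil, if_pos hpal]
          rw [if_neg (by simp [PySem.Str.len])]
      · -- a genuine palindrome
        have hxt : pvIsPal x = true := by simp [pvIsPal, hne, hpal]
        have hxpos : (0 : Int) < PySem.Str.len x := by
          have hl : x.toList ≠ [] := by simpa using hne
          simp [PySem.Str.len]
          exact List.length_pos_iff.mpr hl
        rw [pv_find_insert_pos x _ hpair hxt]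
        cases hrx : (PySem.List.sorted xs PySem.Str.len true).find? pvIsPal with
        | none =>
          simp only [List.foldl_cons, List.foldl_nil, if_pos hpal]
          rw [if_pos (show PySem.Str.len x > ((0 : Int), "").1 from hxpos)]
        | some q =>
          simp only [List.foldl_cons, List.foldl_nil, if_pos hpal]
          by_cases hlt : PySem.Str.len q < PySem.Str.len x
          · rw [if_pos (show PySem.Str.len x > (PySem.Str.len q, q).1 from hlt), if_pos hlt]
          · rw [if_neg (show ¬ PySem.Str.len x > (PySem.Str.len q, q).1 from hlt), if_neg hlt]
    · -- not a palindrome: neither side changes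
      rw [pv_find_insert_neg _ _ _ _ (show pvIsPal x = false by simp [pvIsPal, hpal])]
      simp only [List.foldl_cons, List.foldl_nil, if_neg hpal]

-- ===== VERDICT (by name: the statement is the Claim_ definition above) =====
theorem find_largest_palindrome_spec : Claim_equal_find_largest_palindrome := by
  intro words _
  unfold Spec_find_largest_palindrome find_largest_palindrome find_largest_palindrome_alt
  have h := pv_inv words
  cases hr : (PySem.List.sorted words PySem.Str.len true).find? pvIsPal with
  | none =>
    rw [hr] at h
    simp only [h]
    simp
  | some p =>
    rw [hr] at h
    have hpt : pvIsPal p = true := List.find?_some hr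
    have hpne : p ≠ "" := by
      intro he
      rw [he] at hpt
      simp [pvIsPal] at hpt
    simp only [h]
    simp [hpne]
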